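-- pv_equiv track=rewrite | github.com/EsdrasFerreiraProg/EsdrasFerreiraProg | student_team_simulator.py | print_student_possessions
-- ===== SOURCE A (Python) =====
-- def print_student_possessions(student_state: dict) -> str:
--     string_out = ""
--     for i in student_state["possessions"]:
--         if i != ";":
--             string_out += i
--         else:
--             string_out += ", "
--     return string_out
-- ===== SOURCE B (Python) =====
-- def print_student_possessions(student_state: dict) -> str:
--     # Tokenise on ";" items into groups, then reassemble with ", ".
--     groups = []
--     cur = []
--     for i in student_state["possessions"]:
--         if i == ";":
--             groups.append("".join(cur))
--             cur = []
--         else: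
--             cur.append(i)
--     groups.append("".join(cur))
--     return ", ".join(groups)
-- ===== Notes on version B (the rewrite author's own statement) =====
-- stated objective: alternative
-- what changed: A appends per item into one accumulator string with a per-item branch; B tokenises the possessions into ";"-separated groups and reassembles them with ", ".join, a two-phase split/join pass.
import Mathlib
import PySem

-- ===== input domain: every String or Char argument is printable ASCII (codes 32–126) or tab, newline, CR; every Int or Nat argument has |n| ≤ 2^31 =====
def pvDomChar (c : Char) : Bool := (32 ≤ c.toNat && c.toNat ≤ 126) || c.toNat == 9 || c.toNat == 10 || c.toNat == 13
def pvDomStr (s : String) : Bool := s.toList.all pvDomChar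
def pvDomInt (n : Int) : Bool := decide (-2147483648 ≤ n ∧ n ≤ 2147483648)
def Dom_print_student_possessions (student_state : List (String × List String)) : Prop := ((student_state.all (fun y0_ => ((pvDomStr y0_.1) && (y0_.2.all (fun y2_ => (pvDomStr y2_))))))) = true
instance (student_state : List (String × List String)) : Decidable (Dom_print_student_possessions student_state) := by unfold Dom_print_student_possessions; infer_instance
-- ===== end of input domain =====

-- B tokenises on ";" into groups and reassembles with ", ".join instead of A's per-item
-- accumulator loop; return values agree wherever A returns (Pre_ excludes only the missing-key KeyError).

-- ===== PORT A =====
def print_student_possessions (student_state : List (String × List String)) : String :=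
  match List.lookup "possessions" student_state with
  | none => ""   -- KeyError in Python; excluded by Pre_
  | some ps => ps.foldl (fun string_out i => if i ≠ ";" then string_out ++ i else string_out ++ ", ") ""

-- ===== PORT B =====
def psp_step (gc : List String × List String) (i : String) : List String × List String :=
  if i = ";" then (gc.1 ++ [PySem.Str.join "" gc.2], []) else (gc.1, gc.2 ++ [i])

def print_student_possessions_alt (student_state : List (String × List String)) : String :=
  match List.lookup "possessions" student_state with
  | none => ""   -- KeyError in Python; excluded by Pre_
  | some ps =>
    let gc := ps.foldl psp_step ([], [])
    PySem.Str.join ", " (gc.1 ++ [PySem.Str.join "" gc.2])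

-- ===== PRECONDITION & SPEC =====
-- Pre_ excludes exactly the dicts without a "possessions" key, where Python A raises KeyError.
def Pre_print_student_possessions (student_state : List (String × List String)) : Prop :=
  (List.lookup "possessions" student_state).isSome = true
instance (student_state : List (String × List String)) : Decidable (Pre_print_student_possessions student_state) := by unfold Pre_print_student_possessions; infer_instance
def pvWitness_print_student_possessions : (List (String × List String)) := [("possessions", ["a", ";", "b"])]
def Spec_print_student_possessions (student_state : List (String × List String)) (out : String) : Prop := out = print_student_possessions_alt student_state
instance (student_state : List (String × List String)) (out : String) : Decidable (Spec_print_student_possessions student_state out) := by unfold Spec_print_student_possessions; infer_instance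

-- ===== CLAIM (what is proved, stated in full; the proofs are below) =====
def Claim_equal_print_student_possessions : Prop := ∀ (student_state : List (String × List String)), Dom_print_student_possessions student_state → Pre_print_student_possessions student_state → Spec_print_student_possessions student_state (print_student_possessions student_state)

-- ===== LEMMAS AND PROOFS =====

theorem psp_join_cons {sep a : List Char} {rest : List (List Char)} (h : rest ≠ []) :
    PySem.Chars.join sep (a :: rest) = a ++ sep ++ PySem.Chars.join sep rest := by
  cases rest with
  | nil => exact absurd rfl h
  | cons q r => exact PySem.Chars.join_cons_cons sep a q r

theorem psp_join_snoc {sep x : List Char} (M : List (List Char)) (h : M ≠ []) :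
    PySem.Chars.join sep (M ++ [x]) = PySem.Chars.join sep M ++ sep ++ x := by
  induction M with
  | nil => exact absurd rfl h
  | cons a M ih =>
    cases M with
    | nil => simp [PySem.Chars.join_cons_cons, PySem.Chars.join_singleton]
    | cons b M' =>
      rw [List.cons_append, psp_join_cons (by simp), psp_join_cons (by simp),
          ih (by simp)]
      simp [List.append_assoc]

theorem psp_join_last {sep z : List Char} (L : List (List Char)) (y : List Char) :
    PySem.Chars.join sep (L ++ [y ++ z]) = PySem.Chars.join sep (L ++ [y]) ++ z := by
  cases L with
  | nil => simp [PySem.Chars.join_singleton]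
  | cons a L' =>
    rw [psp_join_snoc (a :: L') (by simp), psp_join_snoc (a :: L') (by simp)]
    simp [List.append_assoc]

-- B's finishing value, on char lists
def psp_fin (g c : List String) : List Char :=
  PySem.Chars.join (", ".toList) ((g.map String.toList) ++ [PySem.Chars.join [] (c.map String.toList)])

theorem psp_fin_eq (g c : List String) :
    (PySem.Str.join ", " (g ++ [PySem.Str.join "" c])).toList = psp_fin g c := by
  simp [psp_fin, PySem.Str.toList_join]

theorem psp_inv (ps : List String) (g c : List String) (acc : String)
    (h : acc.toList = psp_fin g c) :
    psp_fin (ps.foldl psp_step (g, c)).1 (ps.foldl psp_step (g, c)).2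
      = (ps.foldl (fun string_out i => if i ≠ ";" then string_out ++ i else string_out ++ ", ") acc).toList := by
  induction ps generalizing g c acc with
  | nil => simpa using h.symm
  | cons i t ih =>
    by_cases hi : i = ";"
    · subst hi
      simp only [List.foldl_cons, psp_step, ne_eq, not_true_eq_false,
        reduceIte]
      refine ih _ _ _ ?_
      have key : psp_fin (g ++ [PySem.Str.join "" c]) [] = psp_fin g c ++ ", ".toList := by
        unfold psp_fin
        have h1 : List.map String.toList (g ++ [PySem.Str.join "" c]) ++ [PySem.Chars.join [] (List.map String.toList ([] : List String))]
            = (List.map String.toList g ++ [PySem.Chars.join [] (List.map String.toList c)]) ++ [[]] := by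
          simp [PySem.Str.toList_join, PySem.Chars.join_nil]
        rw [h1, psp_join_snoc (List.map String.toList g ++ [PySem.Chars.join [] (List.map String.toList c)]) (by simp)]
        simp
      rw [key, String.toList_append, h]
    · simp only [List.foldl_cons, psp_step, ne_eq, hi, not_false_eq_true,
        reduceIte]
      refine ih _ _ _ ?_
      simp only [String.toList_append, h, psp_fin, List.map_append, List.map_cons,
        List.map_nil]
      have hjoin : PySem.Chars.join [] ((c.map String.toList) ++ [i.toList])
          = PySem.Chars.join [] (c.map String.toList) ++ i.toList := by
        cases hc : c.map String.toList with
        | nil => simp [PySem.Chars.join_singleton, PySem.Chars.join_nil]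
        | cons a r =>
          rw [psp_join_snoc _ (by simp)]
          simp
      rw [hjoin, psp_join_last]

-- ===== VERDICT (by name: the statement is the Claim_ definition above) =====
theorem print_student_possessions_spec : Claim_equal_print_student_possessions := by
  intro st _ hpre
  unfold Spec_print_student_possessions print_student_possessions print_student_possessions_alt
  cases hget : List.lookup "possessions" st with
  | none => -- contradicts Pre_
    unfold Pre_print_student_possessions at hpre
    rw [hget] at hpre
  | some ps =>
    simp only []
    apply String.ext  -- equality via toList
    rw [psp_fin_eq]
    exact (psp_inv ps [] [] "" (by simp [psp_fin, PySem.Chars.join_nil, PySem.Chars.join_singleton])).symm
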